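-- pv_equiv track=rewrite | github.com/jessiecuik/lc | AmazonOA/InitialRewardsTournament.py | countPossibleWinners
-- ===== SOURCE A (Python) =====
-- from typing import List
--
-- def countPossibleWinners(n: int, initialRewards: List[int]) -> int:
--     highest = max(initialRewards)
--     count = 0
--     for i in range(n):
--         endingPoints = initialRewards[i] + n #points of i if won
--         if endingPoints >= highest + n - 1:
--             count += 1
--     return count
-- ===== SOURCE B (Python) =====
-- from typing import List
--
-- def countPossibleWinners(n: int, initialRewards: List[int]) -> int:
--     # Sort-then-scan: a player can win iff its value >= highest - 1,
--     # so sort the first n values ascending and count the qualifying tail,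
--     # stopping at the first (scanning from the top) value below the threshold.
--     highest = max(initialRewards)
--     firstN = sorted(initialRewards[i] for i in range(n))
--     count = 0
--     for v in reversed(firstN):
--         if v < highest - 1:
--             break
--         count += 1
--     return count
-- ===== Notes on version B (the rewrite author's own statement) =====
-- stated objective: alternative
-- what changed: Replaces A's per-index threshold-comparison loop with a sort-then-scan: sort the first n values ascending and count the qualifying tail (values >= max-1), stopping at the first value below the threshold; correct because the winning condition reduces algebraically to value >= highest-1 and that predicate is upward-closed on a sorted list.
import Mathlib
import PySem

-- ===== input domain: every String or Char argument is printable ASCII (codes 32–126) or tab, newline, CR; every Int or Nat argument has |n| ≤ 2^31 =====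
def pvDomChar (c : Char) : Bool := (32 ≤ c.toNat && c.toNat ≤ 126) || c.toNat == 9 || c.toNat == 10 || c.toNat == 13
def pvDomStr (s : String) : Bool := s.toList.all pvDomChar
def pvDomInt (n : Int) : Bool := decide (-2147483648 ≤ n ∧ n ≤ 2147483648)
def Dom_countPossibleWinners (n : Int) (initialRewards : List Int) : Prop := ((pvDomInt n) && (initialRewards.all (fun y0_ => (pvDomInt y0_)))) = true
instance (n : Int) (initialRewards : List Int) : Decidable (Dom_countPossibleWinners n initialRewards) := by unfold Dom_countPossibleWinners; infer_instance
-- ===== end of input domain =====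

-- B replaces A's per-index threshold loop by sort-then-scan: sort the first n values
-- ascending and count the qualifying tail (values ≥ max-1), stopping early (objective: alternative).

-- ===== PORT A =====
def countPossibleWinners (n : Int) (initialRewards : List Int) : Int :=
  match PySem.List.max? initialRewards (fun x => x) with
  | none => 0  -- unreachable under Pre_ (Python raises ValueError on an empty list)
  | some highest =>
    (PySem.List.pyRange 0 n 1).foldl (fun count i =>
      let endingPoints := PySem.List.pyGetD initialRewards i 0 + n  -- in range under Pre_
      if endingPoints ≥ highest + n - 1 then count + 1 else count) 0

-- ===== PORT B =====
-- the 'for v in reversed(firstN): if v < t: break; count += 1' scan of Source B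
def cpwScan (t : Int) : List Int → Int
  | [] => 0
  | v :: rest => if v < t then 0 else cpwScan t rest + 1

def countPossibleWinners_alt (n : Int) (initialRewards : List Int) : Int :=
  match PySem.List.max? initialRewards (fun x => x) with
  | none => 0  -- unreachable under Pre_
  | some highest =>
    let firstN := PySem.List.sorted ((PySem.List.pyRange 0 n 1).map
      (fun i => PySem.List.pyGetD initialRewards i 0)) (fun x => x) false
    cpwScan (highest - 1) firstN.reverse

-- ===== PRECONDITION & SPEC =====
-- Pre_ excludes exactly where A raises: the empty list (ValueError from max) and n > len (IndexError).
def Pre_countPossibleWinners (n : Int) (initialRewards : List Int) : Prop :=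
  initialRewards ≠ [] ∧ n ≤ (initialRewards.length : Int)
instance (n : Int) (initialRewards : List Int) : Decidable (Pre_countPossibleWinners n initialRewards) := by unfold Pre_countPossibleWinners; infer_instance
def pvWitness_countPossibleWinners : Int × List Int := (3, [1, 2, 3])

def Spec_countPossibleWinners (n : Int) (initialRewards : List Int) (out : Int) : Prop := out = countPossibleWinners_alt n initialRewards
instance (n : Int) (initialRewards : List Int) (out : Int) : Decidable (Spec_countPossibleWinners n initialRewards out) := by unfold Spec_countPossibleWinners; infer_instance

-- ===== CLAIM (what is proved, stated in full; the proofs are below) =====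
def Claim_equal_countPossibleWinners : Prop := ∀ (n : Int) (initialRewards : List Int), Dom_countPossibleWinners n initialRewards → Pre_countPossibleWinners n initialRewards → Spec_countPossibleWinners n initialRewards (countPossibleWinners n initialRewards)

-- ===== LEMMAS AND PROOFS =====

-- On a descending list the early-exit scan counts exactly the elements ≥ t.
lemma cpwScan_eq_countP (t : Int) :
    ∀ (l : List Int), l.Pairwise (fun a b => b ≤ a) →
    cpwScan t l = (l.countP (fun v => decide (t ≤ v)) : Int) := by
  intro l
  induction l with
  | nil => simp [cpwScan]
  | cons v rest ih =>
    intro hp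
    rcases List.pairwise_cons.mp hp with ⟨hle, hrest⟩
    simp only [cpwScan, List.countP_cons, decide_eq_true_eq]
    by_cases hv : v < t
    · have h0 : rest.countP (fun v => decide (t ≤ v)) = 0 := by
        rw [List.countP_eq_zero]
        intro x hx
        have := hle x hx
        simp only [decide_eq_true_eq]
        omega
      simp [hv, h0]
    · rw [ih hrest]
      split_ifs <;> push_cast <;> omega

theorem countPossibleWinners_spec : Claim_equal_countPossibleWinners := by
  intro n xs _hd hpre
  obtain ⟨hne, hlen⟩ := hpre
  unfold Spec_countPossibleWinners countPossibleWinners countPossibleWinners_alt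
  cases hmax : PySem.List.max? xs (fun x => x) with
  | none => rfl
  | some h =>
    simp only []
    rw [PySem.List.foldl_ite_add_one]
    set vs : List Int := (PySem.List.pyRange 0 n 1).map (fun i => PySem.List.pyGetD xs i 0) with hvs
    have hrev : (PySem.List.sorted vs (fun x => x) false).reverse.Pairwise (fun a b => b ≤ a) := by
      rw [List.pairwise_reverse]
      exact PySem.List.sorted_pairwise vs (fun x => x)
    rw [cpwScan_eq_countP (h - 1) _ hrev]
    have hperm : (PySem.List.sorted vs (fun x => x) false).reverse.Perm vs :=
      (List.reverse_perm _).trans (PySem.List.sorted_perm vs (fun x => x) false)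
    rw [hperm.countP_eq]
    have hc : (PySem.List.pyRange 0 n 1).countP
          (fun i => decide (PySem.List.pyGetD xs i 0 + n ≥ h + n - 1))
        = vs.countP (fun v => decide (h - 1 ≤ v)) := by
      rw [hvs, List.countP_map]
      apply List.countP_congr
      intro i _
      simp only [Function.comp, decide_eq_true_eq]
      omega
    rw [hc]
    omega
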